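-- pv_equiv track=rewrite | github.com/SSanthoshKumar26/Eduface1 | backend/app.py | group_into_slides
-- ===== SOURCE A (Python) =====
-- def group_into_slides(sections, max_slides=5):
--     """Group sections into slides"""
--     slides = []
--     current_slide = []
--
--     for section in sections:
--         if section['type'] == 'h2':
--             if current_slide:
--                 slides.append(current_slide)
--             current_slide = [section]
--         else:
--             current_slide.append(section)
--
--     if current_slide:
--         slides.append(current_slide)
--
--     return slides[:max_slides]
-- ===== SOURCE B (Python) =====
-- def group_into_slides(sections, max_slides=5):
--     """Group sections into slides (recursive decomposition: peel one slide at a time)"""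
--     def rec(xs):
--         if not xs:
--             return []
--         body = []
--         rest = xs[1:]
--         while rest and rest[0]['type'] != 'h2':
--             body.append(rest[0])
--             rest = rest[1:]
--         return [[xs[0]] + body] + rec(rest)
--     return rec(sections)[:max_slides]
-- ===== Notes on version B (the rewrite author's own statement) =====
-- stated objective: alternative
-- what changed: Replaces A's single left-to-right loop with two accumulators (slides + current buffer, flushed after the loop) by a recursive decomposition that peels one complete slide (head section plus following non-h2 sections) per step, with no buffer and no final flush.
import Mathlib
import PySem

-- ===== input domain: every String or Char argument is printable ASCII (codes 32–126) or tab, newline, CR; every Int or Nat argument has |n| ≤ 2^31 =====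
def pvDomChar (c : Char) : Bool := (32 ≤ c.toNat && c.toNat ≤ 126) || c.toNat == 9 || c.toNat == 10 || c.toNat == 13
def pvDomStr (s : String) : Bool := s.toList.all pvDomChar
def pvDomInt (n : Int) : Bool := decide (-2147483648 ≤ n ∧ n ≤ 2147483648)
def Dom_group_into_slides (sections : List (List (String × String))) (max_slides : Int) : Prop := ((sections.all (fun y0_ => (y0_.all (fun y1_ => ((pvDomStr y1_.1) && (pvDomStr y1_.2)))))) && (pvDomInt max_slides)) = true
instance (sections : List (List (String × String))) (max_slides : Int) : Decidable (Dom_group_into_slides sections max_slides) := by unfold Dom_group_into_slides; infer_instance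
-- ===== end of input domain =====

-- B replaces A's one-pass loop with two accumulators (slides + current buffer with a final flush)
-- by a recursion that peels one complete slide per step; same O(n) cost, different decomposition.

-- ===== PORT A =====
-- first-match lookup of sec['type'] on an association list (raises KeyError when missing; Pre_ excludes that)
def pvType (s : List (String × String)) : String :=
  PySem.Dict.getD (PySem.Dict.mk s) "type" ""

def group_into_slides (sections : List (List (String × String))) (max_slides : Int) : List (List (List (String × String))) :=
  let st := sections.foldl
    (fun (acc : List (List (List (String × String))) × List (List (String × String))) sec =>
      if pvType sec == "h2" then
        (if acc.2 ≠ [] then acc.1 ++ [acc.2] else acc.1, [sec])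
      else
        (acc.1, acc.2 ++ [sec]))
    ([], [])
  let slides := if st.2 ≠ [] then st.1 ++ [st.2] else st.1
  PySem.List.slice slides none (some max_slides)

-- ===== PORT B =====
-- the inner while loop of Source B: collect leading non-h2 sections into body, return (body, rest)
def pvBodyLoop (body : List (List (String × String))) (rest : List (List (String × String))) :
    List (List (String × String)) × List (List (String × String)) :=
  match rest with
  | [] => (body, [])
  | r :: rs =>
    if pvType r == "h2" then (body, r :: rs)
    else pvBodyLoop (body ++ [r]) rs

theorem pvBodyLoop_len (body rest : List (List (String × String))) :
    (pvBodyLoop body rest).2.length ≤ rest.length := by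
  induction rest generalizing body with
  | nil => simp [pvBodyLoop]
  | cons r rs ih =>
    simp only [pvBodyLoop]
    split
    · simp
    · exact le_trans (ih (body ++ [r])) (by simp)

-- Source B's rec: peel one slide (head + following non-h2 body) and recurse on the rest
def pvRec (xs : List (List (String × String))) : List (List (List (String × String))) :=
  match xs with
  | [] => []
  | x :: xt =>
    let p := pvBodyLoop [] xt
    ([x] ++ p.1) :: pvRec p.2
termination_by xs.length
decreasing_by
  exact Nat.lt_succ_of_le (pvBodyLoop_len [] xt)

def group_into_slides_alt (sections : List (List (String × String))) (max_slides : Int) : List (List (List (String × String))) :=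
  PySem.List.slice (pvRec sections) none (some max_slides)

-- ===== PRECONDITION & SPEC =====
-- Pre_ excludes exactly the inputs where Python A raises KeyError: a sec dict with no 'type' key.
def Pre_group_into_slides (sections : List (List (String × String))) (max_slides : Int) : Prop :=
  ∀ s ∈ sections, (PySem.Dict.get? (PySem.Dict.mk s) "type").isSome = true
instance (sections : List (List (String × String))) (max_slides : Int) : Decidable (Pre_group_into_slides sections max_slides) := by unfold Pre_group_into_slides; infer_instance

def pvWitness_group_into_slides : (List (List (String × String))) × Int :=
  ([[("type", "h1"), ("text", "Intro")], [("type", "h2"), ("text", "Part")], [("type", "p"), ("text", "body")]], 5)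

def Spec_group_into_slides (sections : List (List (String × String))) (max_slides : Int) (out : List (List (List (String × String)))) : Prop := out = group_into_slides_alt sections max_slides
instance (sections : List (List (String × String))) (max_slides : Int) (out : List (List (List (String × String)))) : Decidable (Spec_group_into_slides sections max_slides out) := by unfold Spec_group_into_slides; infer_instance

-- ===== CLAIM (what is proved, stated in full; the proofs are below) =====
def Claim_equal_group_into_slides : Prop := ∀ (sections : List (List (String × String))) (max_slides : Int), Dom_group_into_slides sections max_slides → Pre_group_into_slides sections max_slides → Spec_group_into_slides sections max_slides (group_into_slides sections max_slides)

-- ===== LEMMAS AND PROOFS =====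

def pvNh (s : List (String × String)) : Bool := !(pvType s == "h2")

-- the loop body and the post-loop flush of A's port, named for the proofs
def pvStep (acc : List (List (List (String × String))) × List (List (String × String)))
    (sec : List (String × String)) :
    List (List (List (String × String))) × List (List (String × String)) :=
  if pvType sec == "h2" then
    (if acc.2 ≠ [] then acc.1 ++ [acc.2] else acc.1, [sec])
  else
    (acc.1, acc.2 ++ [sec])

def pvFin (st : List (List (List (String × String))) × List (List (String × String))) :
    List (List (List (String × String))) :=
  if st.2 ≠ [] then st.1 ++ [st.2] else st.1

theorem pvA_eq (sections : List (List (String × String))) (max_slides : Int) :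
    group_into_slides sections max_slides
      = PySem.List.slice (pvFin (sections.foldl pvStep ([], []))) none (some max_slides) := rfl

theorem pvBodyLoop_eq (body rest : List (List (String × String))) :
    pvBodyLoop body rest = (body ++ rest.takeWhile pvNh, rest.dropWhile pvNh) := by
  induction rest generalizing body with
  | nil => simp [pvBodyLoop]
  | cons r rs ih =>
    by_cases h : pvType r == "h2"
    · simp [pvBodyLoop, h, List.takeWhile, List.dropWhile, pvNh]
    · simp [pvBodyLoop, h, pvNh, ih]

theorem pvRec_cons (x : List (String × String)) (xt : List (List (String × String))) :
    pvRec (x :: xt) = (x :: xt.takeWhile pvNh) :: pvRec (xt.dropWhile pvNh) := by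
  rw [pvRec]
  simp [pvBodyLoop_eq]

-- the key invariant: A's flushed fold from (slides, cur), cur nonempty, equals
-- slides followed by the slide completed from cur and B's recursion on the remainder
theorem pvFold_eq (rest : List (List (String × String)))
    (slides : List (List (List (String × String)))) (cur : List (List (String × String)))
    (hcur : cur ≠ []) :
    pvFin (rest.foldl pvStep (slides, cur))
      = slides ++ ((cur ++ rest.takeWhile pvNh) :: pvRec (rest.dropWhile pvNh)) := by
  induction rest generalizing slides cur with
  | nil => simp [pvFin, pvRec, hcur]
  | cons r rs ih =>
    rw [List.foldl_cons]
    by_cases h : pvType r == "h2"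
    · rw [show pvStep (slides, cur) r = (slides ++ [cur], [r]) by simp [pvStep, h, hcur]]
      rw [ih (slides ++ [cur]) [r] (by simp)]
      simp [pvNh, h, pvRec_cons]
    · rw [show pvStep (slides, cur) r = (slides, cur ++ [r]) by simp [pvStep, h]]
      rw [ih slides (cur ++ [r]) (by simp)]
      simp [pvNh, h]

theorem pv_main (sections : List (List (String × String))) (max_slides : Int) :
    group_into_slides sections max_slides = group_into_slides_alt sections max_slides := by
  rw [pvA_eq]
  unfold group_into_slides_alt
  congr 1
  cases sections with
  | nil => simp [pvRec, pvFin]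
  | cons x xt =>
    rw [List.foldl_cons]
    rw [show pvStep ([], []) x = ([], [x]) by by_cases h : pvType x == "h2" <;> simp [pvStep, h]]
    rw [pvFold_eq xt [] [x] (by simp), pvRec_cons]
    simp

-- ===== VERDICT (by name: the statement is the Claim_ definition above) =====
theorem group_into_slides_spec : Claim_equal_group_into_slides := by
  intro sections max_slides _ _
  unfold Spec_group_into_slides
  exact pv_main sections max_slides
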